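-- pv_equiv track=rewrite | github.com/Dzibay/RPG_GAME | main.py | is_support
-- ===== SOURCE A (Python) =====
-- def is_support(s):
--     first = None
--     for i in range(len(s)):
--         if s[i] == '<':
--             first = i
--         if s[i] == '>' and first is not None:
--             end = i
--             res = s[first:end]
--             if res[:8] == '<support':
--                 return True
--     return False
-- ===== SOURCE B (Python) =====
-- def is_support(s):
--     parts = s.split('<')
--     for part in parts[1:]:
--         if part.startswith('support') and '>' in part:
--             return True
--     return False
-- ===== Notes on version B (the rewrite author's own statement) =====
-- stated objective: idiomatic
-- what changed: Replaces A's index loop that tracks the last '<' position and re-slices the string at every '>' by splitting the string on '<' once and testing each segment for startswith('support') and a '>'.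
import Mathlib
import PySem

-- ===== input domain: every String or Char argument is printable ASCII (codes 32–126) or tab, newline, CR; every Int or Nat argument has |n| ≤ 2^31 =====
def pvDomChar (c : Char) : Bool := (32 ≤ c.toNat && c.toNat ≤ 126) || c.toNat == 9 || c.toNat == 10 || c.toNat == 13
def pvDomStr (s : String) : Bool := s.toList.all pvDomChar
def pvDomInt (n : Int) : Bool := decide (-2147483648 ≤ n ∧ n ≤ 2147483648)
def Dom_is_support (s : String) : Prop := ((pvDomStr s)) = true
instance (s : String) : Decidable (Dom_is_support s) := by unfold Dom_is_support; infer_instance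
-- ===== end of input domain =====

-- B replaces A's char-by-char scan that tracks the last '<' index by splitting on '<'
-- and testing each segment (objective: idiomatic/simpler; no speed claim).

-- ===== PORT A =====
-- loop "for i in range(len(s))" with state `first` (index of the last '<' seen, or none)
def is_support_go (cs : List Char) (i : Nat) (first : Option Nat) : Bool :=
  if h : i < cs.length then
    let c := cs[i]
    let first' := if c == '<' then some i else first
    match first' with
    | some p =>
      if c == '>' then
        -- res = s[first:end]; res[:8] == '<support'
        if PySem.List.slice (PySem.List.slice cs (some (p : Int)) (some (i : Int))) none (some 8)
             == "<support".toList then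
          true
        else is_support_go cs (i + 1) (some p)
      else is_support_go cs (i + 1) (some p)
    | none => is_support_go cs (i + 1) none
  else false
termination_by cs.length - i

def is_support (s : String) : Bool := is_support_go s.toList 0 none

-- ===== PORT B =====
def is_support_alt (s : String) : Bool :=
  let parts := PySem.Chars.splitOn s.toList ['<']
  (PySem.List.slice parts (some 1) none).any
    (fun part => PySem.Chars.startswith part "support".toList && PySem.Chars.isIn ['>'] part)

-- ===== PRECONDITION & SPEC =====
def Spec_is_support (s : String) (out : Bool) : Prop := out = is_support_alt s
instance (s : String) (out : Bool) : Decidable (Spec_is_support s out) := by unfold Spec_is_support; infer_instance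

-- ===== CLAIM (what is proved, stated in full; the proofs are below) =====
def Claim_equal_is_support : Prop := ∀ (s : String), Dom_is_support s → Spec_is_support s (is_support s)

-- ===== LEMMAS AND PROOFS =====

-- split of a char list on '<': (first piece, remaining pieces)
def msp : List Char → List Char × List (List Char)
  | [] => ([], [])
  | c :: r =>
    let pr := msp r
    if c = '<' then ([], pr.1 :: pr.2) else (c :: pr.1, pr.2)

-- the per-segment test B performs, phrased on `take 7`
def segPred (p : List Char) : Bool := (p.take 7 == "support".toList) && p.contains '>'

-- list-structured version of A's scan: state = chars strictly after the last '<' (none before any '<')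
def cScan : List Char → Option (List Char) → Bool
  | [], _ => false
  | c :: r, seg =>
    if c = '<' then cScan r (some [])
    else
      match seg with
      | none => cScan r none
      | some sg =>
        if c == '>' && sg.take 7 == "support".toList then true
        else cScan r (some (sg ++ [c]))

lemma splitOn_go_single (fuel : Nat) :
    ∀ (l cur : List Char) (acc : List (List Char)), l.length ≤ fuel →
      PySem.Chars.splitOn.go ['<'] fuel l cur acc
        = acc.reverse ++ (cur.reverse ++ (msp l).1) :: (msp l).2 := by
  induction fuel with
  | zero =>
    intro l cur acc hl
    have : l = [] := List.eq_nil_of_length_eq_zero (Nat.le_zero.mp hl)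
    subst this
    simp [PySem.Chars.splitOn.go, msp]
  | succ fuel ih =>
    intro l cur acc hl
    cases l with
    | nil => simp [PySem.Chars.splitOn.go, msp]
    | cons c rest =>
      by_cases hc : c = '<'
      · subst hc
        have hpre : List.isPrefixOf ['<'] ('<' :: rest) = true := by simp [List.isPrefixOf]
        rw [PySem.Chars.splitOn.go]
        simp only [hpre, if_true, show (['<'] : List Char).length = 1 from rfl,
          List.drop_succ_cons, List.drop_zero]
        rw [ih rest [] ((List.reverse cur) :: acc) (by simpa using Nat.lt_succ_iff.mp (by simpa using hl))]
        simp [msp]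
      · have hpre : List.isPrefixOf ['<'] (c :: rest) = false := by
          simp [List.isPrefixOf]
          exact fun h => hc h.symm
        rw [PySem.Chars.splitOn.go]
        simp only [hpre]
        rw [ih rest (c :: cur) acc (by simpa using Nat.lt_succ_iff.mp (by simpa using hl))]
        simp [msp, hc]

lemma splitOn_single (cs : List Char) :
    PySem.Chars.splitOn cs ['<'] = (msp cs).1 :: (msp cs).2 := by
  unfold PySem.Chars.splitOn
  rw [splitOn_go_single (cs.length + 1) cs [] [] (Nat.le_succ _)]
  simp

lemma support_no_gt : '>' ∉ "support".toList := by decide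

lemma take7_append_gt (sg t : List Char) (h : ¬ sg.take 7 = "support".toList) :
    ¬ (sg ++ '>' :: t).take 7 = "support".toList := by
  intro hEq
  by_cases hlen : 7 ≤ sg.length
  · exact h (by rwa [List.take_append_of_le_length hlen] at hEq)
  · push_neg at hlen
    have hmem : '>' ∈ (sg ++ '>' :: t).take 7 := by
      rw [List.take_append]
      have : 0 < 7 - sg.length := by omega
      rcases Nat.exists_eq_succ_of_ne_zero (Nat.pos_iff_ne_zero.mp this) with ⟨k, hk⟩
      rw [hk]
      simp
    rw [hEq] at hmem
    exact support_no_gt hmem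

lemma cScan_some (l : List Char) : ∀ sg : List Char,
    cScan l (some sg)
      = ((((sg ++ (msp l).1).take 7 == "support".toList) && (msp l).1.contains '>')
          || (msp l).2.any segPred) := by
  induction l with
  | nil => intro sg; simp [cScan, msp]
  | cons c r ih =>
    intro sg
    by_cases hc : c = '<'
    · subst hc
      rw [show cScan ('<' :: r) (some sg) = cScan r (some []) from by simp [cScan]]
      rw [ih []]
      simp [msp, segPred, List.any_cons]
    · have hmsp : msp (c :: r) = (c :: (msp r).1, (msp r).2) := by simp [msp, hc]
      by_cases hhit : c = '>' ∧ sg.take 7 = "support".toList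
      · obtain ⟨hcgt, htake⟩ := hhit
        subst hcgt
        have hL : cScan ('>' :: r) (some sg) = true := by
          simp [cScan, htake]
        rw [hL, hmsp]
        have hlen : 7 ≤ sg.length := by
          have := congrArg List.length htake
          simp at this; omega
        rw [List.take_append_of_le_length hlen]
        simp [htake]
      · have hcond : (c == '>' && (sg.take 7 == "support".toList)) = false := by
          rcases Decidable.not_and_iff_not_or_not.mp hhit with h1 | h1
          · simp [h1]
          · simp only [Bool.and_eq_false_iff]
            right
            simpa using h1
        have hL : cScan (c :: r) (some sg) = cScan r (some (sg ++ [c])) := by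
          simp only [cScan, if_neg hc, hcond]
          simp
        rw [hL, ih (sg ++ [c]), hmsp]
        have hassoc : sg ++ [c] ++ (msp r).1 = sg ++ c :: (msp r).1 := by simp
        rw [hassoc]
        by_cases hcgt : c = '>'
        · subst hcgt
          have htake : ¬ sg.take 7 = "support".toList := fun ht => hhit ⟨rfl, ht⟩
          have h2 : (List.take 7 (sg ++ '>' :: (msp r).1) == "support".toList) = false := by
            simpa using take7_append_gt sg (msp r).1 htake
          simp only [show ("support".toList : List Char) = ['s','u','p','p','o','r','t'] from rfl] at h2 ⊢
          simp [h2]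
        · have hne : ('>' : Char) ≠ c := fun h => hcgt h.symm
          simp [List.mem_cons, hne]

lemma cScan_none (l : List Char) :
    cScan l none = (msp l).2.any segPred := by
  induction l with
  | nil => simp [cScan, msp]
  | cons c r ih =>
    by_cases hc : c = '<'
    · subst hc
      rw [show cScan ('<' :: r) none = cScan r (some []) from by simp [cScan]]
      rw [cScan_some r []]
      simp [msp, segPred, List.any_cons]
    · rw [show cScan (c :: r) none = cScan r none from by simp [cScan, hc]]
      rw [ih]
      simp [msp, hc]

lemma aGo_eq (cs : List Char) : ∀ (k i : Nat) (first : Option Nat),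
    cs.length - i ≤ k →
    (∀ p, first = some p → p < i ∧ cs[p]? = some '<') →
    is_support_go cs i first
      = cScan (cs.drop i) (first.map (fun p => (cs.drop (p + 1)).take (i - (p + 1)))) := by
  intro k
  induction k with
  | zero =>
    intro i first hk _
    have hge : cs.length ≤ i := by omega
    rw [is_support_go]
    simp [Nat.not_lt.mpr hge, List.drop_eq_nil_of_le hge, cScan]
  | succ k ih =>
    intro i first hk hinv
    by_cases h : i < cs.length
    · have hdrop : cs.drop i = cs[i] :: cs.drop (i + 1) := List.drop_eq_getElem_cons h
      by_cases hc : cs[i] = '<'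
      · -- first becomes some i, and we never also see '>'
        have hA : is_support_go cs i first = is_support_go cs (i + 1) (some i) := by
          rw [is_support_go]
          simp only [h, dif_pos]
          simp [hc]
        rw [hA, ih (i + 1) (some i) (by omega)
            (by intro p hp; cases hp; exact ⟨Nat.lt_succ_self i, by simp [List.getElem?_eq_getElem h, hc]⟩)]
        rw [hdrop, hc]
        simp [cScan]
      · cases first with
        | none =>
          have hA : is_support_go cs i none = is_support_go cs (i + 1) none := by
            rw [is_support_go]
            simp only [h, dif_pos]
            simp [hc]
          rw [hA, ih (i + 1) none (by omega) (by intro p hp; cases hp)]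
          rw [hdrop]
          simp [cScan, hc]
        | some p =>
          obtain ⟨hpi, hpget⟩ := hinv p rfl
          -- the state list for position i
          set sg := (cs.drop (p + 1)).take (i - (p + 1)) with hsg
          have hslice : PySem.List.slice cs (some (p : Int)) (some (i : Int)) = '<' :: sg := by
            rw [PySem.List.slice_natCast]
            have hdp : cs.drop p = '<' :: cs.drop (p + 1) := by
              have := List.drop_eq_getElem_cons (l := cs) (by omega : p < cs.length)
              rw [this]
              congr 1
              have : cs[p] = '<' := by
                have := List.getElem?_eq_getElem (l := cs) (by omega : p < cs.length)
                rw [this] at hpget; exact Option.some.inj hpget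
              exact this
            rw [hdp]
            have : i - p = (i - (p + 1)) + 1 := by omega
            rw [this, List.take_succ_cons]
          have hsgnext : (cs.drop (p + 1)).take (i + 1 - (p + 1)) = sg ++ [cs[i]] := by
            have h1 : i + 1 - (p + 1) = (i - (p + 1)) + 1 := by omega
            rw [h1, List.take_succ]
            congr 1
            have h2 : (cs.drop (p + 1))[i - (p + 1)]? = cs[p + 1 + (i - (p + 1))]? := by
              simp [List.getElem?_drop]
            have h3 : p + 1 + (i - (p + 1)) = i := by omega
            rw [h2, h3, List.getElem?_eq_getElem h]
            rfl
          have hinv' : ∀ q, (some p : Option Nat) = some q → q < i + 1 ∧ cs[q]? = some '<' := by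
            intro q hq; cases hq; exact ⟨by omega, hpget⟩
          by_cases hgt : cs[i] = '>'
          · by_cases hres : sg.take 7 = "support".toList
            · -- hit: both return true
              have hA : is_support_go cs i (some p) = true := by
                rw [is_support_go]
                simp only [h, dif_pos]
                simp only [show (cs[i] == '<') = false from by simp [hc]]
                simp [hgt, hslice, PySem.List.slice_to (b := (8:Int)) ('<' :: sg) (by norm_num),
                      show ((8:Int)).toNat = 8 from rfl, hres,
                      show "<support".toList = '<' :: "support".toList from rfl]
              rw [hA, hdrop]
              simp [cScan, hc, hgt]
              exact Or.inl hres
            · have hA : is_support_go cs i (some p) = is_support_go cs (i + 1) (some p) := by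
                rw [is_support_go]
                simp only [h, dif_pos]
                simp only [show (cs[i] == '<') = false from by simp [hc]]
                simp [hgt, hslice, PySem.List.slice_to (b := (8:Int)) ('<' :: sg) (by norm_num),
                      show ((8:Int)).toNat = 8 from rfl,
                      show "<support".toList = '<' :: "support".toList from rfl]
                exact fun ht => absurd ht hres
              rw [hA, ih (i + 1) (some p) (by omega) hinv']
              rw [hdrop]
              simp only [cScan, hc, hgt, Option.map_some, hsgnext]
              rw [← hsg]
              have hres2 : ¬ List.take 7 sg = ['s','u','p','p','o','r','t'] := hres
              simp [cScan, hgt, hres2]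
          · have hA : is_support_go cs i (some p) = is_support_go cs (i + 1) (some p) := by
              rw [is_support_go]
              simp only [h, dif_pos]
              simp [hc, hgt]
            rw [hA, ih (i + 1) (some p) (by omega) hinv']
            rw [hdrop]
            simp only [cScan, hc, hgt, Option.map_some, hsgnext]
            rw [← hsg]
            simp [cScan, hgt]
    · rw [is_support_go]
      have hge : cs.length ≤ i := Nat.not_lt.mp h
      simp [h, List.drop_eq_nil_of_le hge, cScan]

lemma segPred_eq (p : List Char) :
    (PySem.Chars.startswith p "support".toList && PySem.Chars.isIn ['>'] p) = segPred p := by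
  rw [Bool.eq_iff_iff]
  simp only [Bool.and_eq_true, segPred, beq_iff_eq]
  constructor
  · rintro ⟨h1, h2⟩
    have hpre := PySem.Chars.startswith_iff p "support".toList |>.mp h1
    have hin := PySem.Chars.isIn_iff_infix ['>'] p |>.mp h2
    refine ⟨?_, ?_⟩
    · have := List.prefix_iff_eq_take.mp hpre
      simpa using this.symm
    · simp only [List.contains_eq_mem, decide_eq_true_eq]
      obtain ⟨u, v, huv⟩ := hin
      rw [← huv]; simp
  · rintro ⟨h1, h2⟩
    refine ⟨?_, ?_⟩
    · apply (PySem.Chars.startswith_iff p "support".toList).mpr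
      apply List.prefix_iff_eq_take.mpr
      simpa using h1.symm
    · apply (PySem.Chars.isIn_iff_infix ['>'] p).mpr
      have hm : '>' ∈ p := by simpa [List.contains_eq_mem] using h2
      rcases List.append_of_mem hm with ⟨u, v, huv⟩
      exact ⟨u, v, by simp [huv]⟩

-- ===== VERDICT (by name: the statement is the Claim_ definition above) =====
theorem is_support_spec : Claim_equal_is_support := by
  intro s _
  unfold Spec_is_support is_support is_support_alt
  rw [aGo_eq s.toList (s.toList.length) 0 none (by omega) (by intro p hp; cases hp)]
  simp only [List.drop_zero, Option.map_none]
  rw [cScan_none, splitOn_single]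
  rw [PySem.List.slice_from (((msp s.toList).1 :: (msp s.toList).2)) (by norm_num : (0:Int) ≤ 1)]
  simp only [show ((1:Int)).toNat = 1 from rfl, List.drop_succ_cons, List.drop_zero]
  congr 1
  funext p
  rw [segPred_eq]
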